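-- pv_equiv track=rewrite | github.com/mohammed-yassinehabibi/Challenge_Kernel | Local_packages/kernels.py | generate_mismatch_neighbors
-- ===== SOURCE A (Python) =====
-- from itertools import product, combinations
--
-- def generate_mismatch_neighbors(kmer, alphabet, m):
--     """
--     Generate all k-mers within m mismatches of the given k-mer.
--     Uses combinations (distinct positions) rather than product over positions.
--     """
--     neighbors = set()
--     k = len(kmer)
--     # For each combination of m distinct positions
--     for positions in combinations(range(k), m):
--         for replacements in product(alphabet, repeat=m):
--             new_kmer = list(kmer)
--             for pos, repl in zip(positions, replacements):
--                 new_kmer[pos] = repl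
--             neighbors.add("".join(new_kmer))
--     # Always include the original k-mer
--     neighbors.add(kmer)
--     return neighbors
-- ===== SOURCE B (Python) =====
-- def generate_mismatch_neighbors(kmer, alphabet, m):
--     """
--     Generate all k-mers within m mismatches of the given k-mer.
--     Recursive segment builder: positions are chosen left to right and the
--     partial strings are extended in batches, instead of materialising position
--     tuples and replacement tuples and mutating a char list for every candidate.
--     """
--     k = len(kmer)
--     out = []
--
--     def rec(start, r, prefixes):
--         if r == 0:
--             for s in prefixes:
--                 out.append(s + kmer[start:])
--             return
--         for p in range(start, k - r + 1):
--             seg = kmer[start:p]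
--             rec(p + 1, r - 1, [s + seg + c for s in prefixes for c in alphabet])
--
--     rec(0, m, [""])
--     out.append(kmer)
--     return set(out)
-- ===== Notes on version B (the rewrite author's own statement) =====
-- stated objective: alternative
-- what changed: A enumerates itertools.combinations x product tuples and, for every candidate, copies the k-mer into a char list, mutates it and joins it, adding to a set one by one; B is a recursive segment builder that picks mismatch positions left to right and extends whole batches of partial strings by slices of the k-mer, deduplicating once at the end.
import Mathlib
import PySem

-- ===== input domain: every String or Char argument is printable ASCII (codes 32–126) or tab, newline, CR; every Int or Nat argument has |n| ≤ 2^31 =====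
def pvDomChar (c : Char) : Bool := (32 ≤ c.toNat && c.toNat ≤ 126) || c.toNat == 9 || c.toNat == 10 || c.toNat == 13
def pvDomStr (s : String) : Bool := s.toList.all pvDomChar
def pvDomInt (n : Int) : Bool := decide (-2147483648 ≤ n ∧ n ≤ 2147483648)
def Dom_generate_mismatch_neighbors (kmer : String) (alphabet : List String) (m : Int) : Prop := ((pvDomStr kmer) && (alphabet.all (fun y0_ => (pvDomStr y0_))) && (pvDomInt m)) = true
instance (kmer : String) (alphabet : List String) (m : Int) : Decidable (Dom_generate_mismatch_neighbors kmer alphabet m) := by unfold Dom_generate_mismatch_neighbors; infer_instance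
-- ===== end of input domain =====

-- B replaces A's combinations×product tuple enumeration (char-list mutation and an
-- incremental set.add per candidate) by a recursive segment builder that extends
-- partial strings in batches and deduplicates once at the end (alternative algorithm).

-- ===== PORT A =====
-- itertools.product(alphabet, repeat=n), in CPython's order (first coordinate slowest)
def pvProd (alphabet : List String) : Nat → List (List String)
  | 0 => [[]]
  | n + 1 => alphabet.flatMap (fun a => (pvProd alphabet n).map (fun t => a :: t))

def generate_mismatch_neighbors (kmer : String) (alphabet : List String) (m : Int) : List String :=
  let k : Int := PySem.Str.len kmer
  let neighbors : PySem.Set String :=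
    (PySem.List.combinations (PySem.List.pyRange 0 k 1) m.toNat).foldl
      (fun nb positions =>
        (pvProd alphabet m.toNat).foldl
          (fun nb2 replacements =>
            PySem.Set.add nb2 (PySem.Str.join ""
              ((positions.zip replacements).foldl
                (fun l pr => PySem.List.pySetD l pr.1 pr.2)
                (kmer.toList.map (fun c => String.ofList [c])))))
          nb)
      PySem.Set.empty
  PySem.Set.add neighbors kmer

-- ===== PORT B =====
-- the nested helper rec(start, r, prefixes) of Source B; 'out' is the accumulator list
def pvAltRec (kmer : String) (alphabet : List String) (k : Int) :
    Nat → Int → List String → List String → List String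
  | 0, start, prefixes, out =>
      prefixes.foldl (fun o s => o ++ [s ++ PySem.Str.slice kmer (some start) none]) out
  | r + 1, start, prefixes, out =>
      (PySem.List.pyRange start (k - ((r : Int) + 1) + 1) 1).foldl
        (fun o p =>
          pvAltRec kmer alphabet k r (p + 1)
            (prefixes.flatMap (fun s =>
              alphabet.map (fun c => s ++ PySem.Str.slice kmer (some start) (some p) ++ c)))
            o)
        out

def generate_mismatch_neighbors_alt (kmer : String) (alphabet : List String) (m : Int) : List String :=
  let k : Int := PySem.Str.len kmer
  let out := pvAltRec kmer alphabet k m.toNat 0 [""] []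
  PySem.Set.ofList (out ++ [kmer])

-- ===== PRECONDITION & SPEC =====
-- Pre_ excludes m < 0, where Python A raises ValueError (combinations with a negative r).
def Pre_generate_mismatch_neighbors (kmer : String) (alphabet : List String) (m : Int) : Prop :=
  0 ≤ m
instance (kmer : String) (alphabet : List String) (m : Int) : Decidable (Pre_generate_mismatch_neighbors kmer alphabet m) := by unfold Pre_generate_mismatch_neighbors; infer_instance

def pvWitness_generate_mismatch_neighbors : String × List String × Int := ("AB", ["A", "B"], 1)

def Spec_generate_mismatch_neighbors (kmer : String) (alphabet : List String) (m : Int) (out : List String) : Prop := out = generate_mismatch_neighbors_alt kmer alphabet m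
instance (kmer : String) (alphabet : List String) (m : Int) (out : List String) : Decidable (Spec_generate_mismatch_neighbors kmer alphabet m out) := by unfold Spec_generate_mismatch_neighbors; infer_instance

-- ===== CLAIM (what is proved, stated in full; the proofs are below) =====
def Claim_equal_generate_mismatch_neighbors : Prop := ∀ (kmer : String) (alphabet : List String) (m : Int), Dom_generate_mismatch_neighbors kmer alphabet m → Pre_generate_mismatch_neighbors kmer alphabet m → Spec_generate_mismatch_neighbors kmer alphabet m (generate_mismatch_neighbors kmer alphabet m)

-- ===== LEMMAS AND PROOFS =====

-- spec of Source B's prefix batches: all expansions of s obtained by choosing the remaining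
-- mismatch positions from P onwards (P ascending), replacements in product order
def pvExpandS (kmer : String) (alphabet : List String) : List Int → Int → String → List String
  | [], start, s => [s ++ PySem.Str.slice kmer (some start) none]
  | p :: P, start, s =>
      alphabet.flatMap (fun c =>
        pvExpandS kmer alphabet P (p + 1) (s ++ PySem.Str.slice kmer (some start) (some p) ++ c))

-- string-level segment spec: the neighbor obtained from absolute mismatch positions P
-- (ascending, Nat) with replacement strings R, as slices of kmer interleaved with R
def pvSegsS (kmer : String) : Nat → List Nat → List String → String
  | start, [], _ => PySem.Str.slice kmer (some (start : Int)) none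
  | start, _ :: _, [] => PySem.Str.slice kmer (some (start : Int)) none
  | start, p :: P, r :: R =>
      PySem.Str.slice kmer (some (start : Int)) (some (p : Int)) ++ r ++ pvSegsS kmer (p + 1) P R

-- char-level twin of pvSegsS
def pvSegsC (cs : List Char) : Nat → List Nat → List (List Char) → List Char
  | start, [], _ => cs.drop start
  | start, _ :: _, [] => cs.drop start
  | start, p :: P, r :: R => (cs.drop start).take (p - start) ++ r ++ pvSegsC cs (p + 1) P R

lemma pvSegsS_toList (kmer : String) :
    ∀ (Pn : List Nat) (start : Nat) (R : List String),
      (pvSegsS kmer start Pn R).toList = pvSegsC kmer.toList start Pn (R.map String.toList)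
  | [], start, R => by simp [pvSegsS, pvSegsC, pysem]
  | p :: P, start, [] => by simp [pvSegsS, pvSegsC, pysem]
  | p :: P, start, r :: R => by
    simp [pvSegsS, pvSegsC, String.toList_append, pvSegsS_toList kmer P (p + 1) R, pysem]

lemma pvFlattenSingletons : ∀ (l : List Char), (l.map (fun c => [c])).flatten = l
  | [] => rfl
  | a :: t => by simp [pvFlattenSingletons t]

-- a fold of list-sets distributes over ++ when every index lands in the right part
lemma pvFoldlSetShift {α : Type} :
    ∀ (L : List (Nat × α)) (pre rest : List α), (∀ q ∈ L, pre.length ≤ q.1) →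
      L.foldl (fun l pr => l.set pr.1 pr.2) (pre ++ rest)
        = pre ++ (L.map (fun pr => (pr.1 - pre.length, pr.2))).foldl (fun l pr => l.set pr.1 pr.2) rest
  | [], pre, rest, _ => by simp
  | q :: L, pre, rest, h => by
    have hq : pre.length ≤ q.1 := h q (by simp)
    simp only [List.foldl_cons, List.set_append_right q.1 q.2 hq, List.map_cons]
    exact pvFoldlSetShift L pre _ (fun x hx => h x (by simp [hx]))

-- the flattened result of A's "mutate a char list at P" fold is the segment decomposition
lemma pvFoldSet (cs : List Char) :
    ∀ (Pn : List Nat) (Rl : List (List Char)) (start : Nat),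
      Rl.length = Pn.length → Pn.Pairwise (· < ·) → (∀ p ∈ Pn, start ≤ p ∧ p < cs.length) →
      (((Pn.map (· - start)).zip Rl).foldl (fun l pr => l.set pr.1 pr.2)
          ((cs.drop start).map (fun c => [c]))).flatten
        = pvSegsC cs start Pn Rl
  | [], Rl, start, hlen, _, _ => by
    have : Rl = [] := List.eq_nil_of_length_eq_zero hlen
    subst this
    simp only [List.map_nil, List.zip_nil_left, List.foldl_nil, pvSegsC]
    exact pvFlattenSingletons _
  | p :: P, r :: R, start, hlen, hpw, hb => by
    have hsp : start ≤ p := (hb p (by simp)).1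
    have hpc : p < cs.length := (hb p (by simp)).2
    obtain ⟨hhead, htail⟩ := List.pairwise_cons.mp hpw
    have hplt : p - start < ((cs.drop start).map (fun c => [c])).length := by
      simp [List.length_drop]; omega
    simp only [List.map_cons, List.zip_cons_cons, List.foldl_cons]
    rw [List.set_eq_take_cons_drop _ hplt, ← List.map_take,
        show (((cs.drop start).map (fun c => [c])).drop (p - start + 1))
            = (cs.drop (p + 1)).map (fun c => [c]) by
          rw [← List.map_drop, List.drop_drop]
          congr 2
          omega,
        show ((cs.drop start).take (p - start)).map (fun c => [c]) ++ r :: (cs.drop (p + 1)).map (fun c => [c])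
            = (((cs.drop start).take (p - start)).map (fun c => [c]) ++ [r]) ++ (cs.drop (p + 1)).map (fun c => [c]) by
          simp]
    have hlenpre : (((cs.drop start).take (p - start)).map (fun c => [c]) ++ [r]).length = p - start + 1 := by
      simp [List.length_take, List.length_drop]; omega
    have hzipmap : (P.map (· - start)).zip R = (P.zip R).map (Prod.map (· - start) id) := by
      rw [List.zip_map_left]
    have hge : ∀ q ∈ (P.map (· - start)).zip R, (((cs.drop start).take (p - start)).map (fun c => [c]) ++ [r]).length ≤ q.1 := by
      intro q hq
      rw [hlenpre, hzipmap] at *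
      obtain ⟨⟨x, y⟩, hmem, rfl⟩ := List.mem_map.mp hq
      have hx : p < x := hhead x (List.of_mem_zip hmem).1
      simp [Prod.map]
      omega
    rw [pvFoldlSetShift _ _ _ hge, List.flatten_append]
    have hshift : ((P.map (· - start)).zip R).map (fun pr => (pr.1 - (((cs.drop start).take (p - start)).map (fun c => [c]) ++ [r]).length, pr.2))
        = (P.map (· - (p + 1))).zip R := by
      rw [hlenpre, hzipmap, List.zip_map_left, List.map_map]
      apply List.map_congr_left
      intro pr hpr
      have hx : p < pr.1 := hhead pr.1 (List.of_mem_zip hpr).1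
      simp [Prod.map]
      omega
    rw [hshift]
    rw [pvFoldSet cs P R (p + 1) (by simpa using hlen) htail
      (fun q hq => ⟨hhead q hq, (hb q (by simp [hq])).2⟩)]
    simp only [pvSegsC, List.flatten_append, pvFlattenSingletons]
    simp

lemma pvProd_length (alphabet : List String) :
    ∀ (n : Nat), ∀ t ∈ pvProd alphabet n, t.length = n
  | 0, t, ht => by
    simp only [pvProd, List.mem_singleton] at ht
    simp [ht]
  | n + 1, t, ht => by
    simp only [pvProd, List.mem_flatMap, List.mem_map] at ht
    obtain ⟨a, _, t', ht', rfl⟩ := ht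
    simp [pvProd_length alphabet n t' ht']

-- Chars.join with the empty separator is flatten
lemma pvJoinNilFlatten : ∀ (ls : List (List Char)), PySem.Chars.join [] ls = ls.flatten
  | [] => by simp [pysem]
  | [a] => by simp [pysem]
  | a :: b :: t => by
    rw [PySem.Chars.join_cons_cons]
    simp [pvJoinNilFlatten (b :: t)]

-- a set-fold commutes with map
lemma pvMapFoldSet {α β : Type} (f : α → β) :
    ∀ (L : List (Nat × α)) (X : List α),
      (L.foldl (fun l pr => l.set pr.1 pr.2) X).map f
        = (L.map (fun pr => (pr.1, f pr.2))).foldl (fun l pr => l.set pr.1 pr.2) (X.map f)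
  | [], X => by simp
  | q :: L, X => by
    simp only [List.foldl_cons, List.map_cons]
    rw [pvMapFoldSet f L, List.map_set]

-- A's inner candidate (join of the mutated char list) equals the segment build from 0
lemma pvCandidate (kmer : String) (Pn : List Nat) (reps : List String)
    (hlen : reps.length = Pn.length) (hpw : Pn.Pairwise (· < ·))
    (hbound : ∀ p ∈ Pn, p < kmer.toList.length) :
    PySem.Str.join ""
        (((Pn.map (Nat.cast : Nat → Int)).zip reps).foldl
          (fun l pr => PySem.List.pySetD l pr.1 pr.2)
          (kmer.toList.map (fun c => String.ofList [c])))
      = "" ++ pvSegsS kmer 0 Pn reps := by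
  apply String.toList_inj.mp
  rw [String.toList_append, pvSegsS_toList]
  have h0 : ("" : String).toList = [] := rfl
  rw [h0, List.nil_append]
  have h1 : ((Pn.map (Nat.cast : Nat → Int)).zip reps).foldl
          (fun l pr => PySem.List.pySetD l pr.1 pr.2)
          (kmer.toList.map (fun c => String.ofList [c]))
      = (Pn.zip reps).foldl (fun l pr => l.set pr.1 pr.2)
          (kmer.toList.map (fun c => String.ofList [c])) := by
    rw [List.zip_map_left, List.foldl_map]
    have hf : (fun (l : List String) (pr : Nat × String) => PySem.List.pySetD l ((pr.1 : Nat) : Int) pr.2)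
        = fun (l : List String) pr => l.set pr.1 pr.2 := by
      funext l pr
      simp [pysem]
    simp only [Prod.map, id]
    rw [hf]
  rw [h1]
  have h2 : ∀ X : List String, (PySem.Str.join "" X).toList = PySem.Chars.join [] (X.map String.toList) := by
    intro X
    simp [pysem]
  rw [h2, pvJoinNilFlatten, pvMapFoldSet]
  have h3 : ((Pn.zip reps).map (fun pr => (pr.1, pr.2.toList)))
      = Pn.zip (reps.map String.toList) := by
    rw [List.zip_map_right]
    rfl
  have h4 : (kmer.toList.map (fun c => String.ofList [c])).map String.toList
      = kmer.toList.map (fun c => [c]) := by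
    rw [List.map_map]
    simp [Function.comp]
  rw [h3, h4]
  have h5 := pvFoldSet kmer.toList Pn (reps.map String.toList) 0
    (by simpa using hlen) hpw (fun p hp => ⟨Nat.zero_le p, hbound p hp⟩)
  simpa using h5

-- B's expansion of one position list equals the product-order batch of segment builds
lemma pvExpandS_prod (kmer : String) (alphabet : List String) :
    ∀ (Pn : List Nat) (start : Nat) (s : String),
      pvExpandS kmer alphabet (Pn.map (Nat.cast : Nat → Int)) (start : Int) s
        = (pvProd alphabet Pn.length).map (fun reps => s ++ pvSegsS kmer start Pn reps)
  | [], start, s => by simp [pvExpandS, pvProd, pvSegsS]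
  | p :: P, start, s => by
    simp only [List.map_cons, pvExpandS, pvProd, List.length_cons]
    rw [List.map_flatMap]
    apply List.flatMap_congr
    intro c _
    rw [List.map_map]
    have hc : ((p : Int) + 1) = ((p + 1 : Nat) : Int) := by push_cast; ring
    rw [hc, pvExpandS_prod kmer alphabet P (p + 1) (s ++ PySem.Str.slice kmer (some (start : Int)) (some (p : Int)) ++ c)]
    apply List.map_congr_left
    intro t _
    simp only [Function.comp, pvSegsS]
    simp [String.append_assoc]

-- loop over the first chosen position = cons-decomposition of combinations
theorem pvCombLoop (k : Int) (r : Nat) (F : List Int → List String) (start : Int) :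
    (PySem.List.pyRange start (k - (r : Int)) 1).flatMap
        (fun p => ((PySem.List.combinations (PySem.List.pyRange (p + 1) k 1) r).map (fun P => p :: P)).flatMap F)
      = (PySem.List.combinations (PySem.List.pyRange start k 1) (r + 1)).flatMap F := by
  by_cases h : k - (r : Int) ≤ start
  · rw [PySem.List.pyRange_one_eq_nil h]
    have hlen : (PySem.List.pyRange start k 1).length < r + 1 := by
      rw [PySem.List.length_pyRange_one]
      omega
    rw [PySem.List.combinations_eq_nil_of_length_lt _ hlen]
    simp
  · have h0 : start < k - (r : Int) := lt_of_not_ge h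
    have h1 : start < k := by omega
    rw [PySem.List.pyRange_one_cons h0, PySem.List.pyRange_one_cons h1,
        PySem.List.combinations_cons_succ]
    rw [List.flatMap_cons, List.flatMap_append]
    congr 1
    exact pvCombLoop k r F (start + 1)
termination_by (k - start).toNat
decreasing_by
  simp_wf
  omega

-- characterisation of Source B's rec
lemma pvAltRec_eq (kmer : String) (alphabet : List String) (k : Int) :
    ∀ (r : Nat) (start : Int) (prefixes out : List String),
      pvAltRec kmer alphabet k r start prefixes out
        = out ++ (PySem.List.combinations (PySem.List.pyRange start k 1) r).flatMap
            (fun P => prefixes.flatMap (fun s => pvExpandS kmer alphabet P start s))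
  | 0, start, prefixes, out => by
    rw [pvAltRec, PySem.List.foldl_append_singleton_eq_map, PySem.List.combinations_zero]
    simp only [List.flatMap_cons, List.flatMap_nil, List.append_nil, pvExpandS]
    congr 1
    induction prefixes with
    | nil => rfl
    | cons a t ih => simp_all
  | r + 1, start, prefixes, out => by
    rw [pvAltRec]
    have hbody : ∀ (o : List String), ∀ p ∈ PySem.List.pyRange start (k - ((r : Int) + 1) + 1) 1,
        pvAltRec kmer alphabet k r (p + 1)
            (prefixes.flatMap (fun s =>
              alphabet.map (fun c => s ++ PySem.Str.slice kmer (some start) (some p) ++ c))) o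
          = o ++ ((PySem.List.combinations (PySem.List.pyRange (p + 1) k 1) r).map (fun P => p :: P)).flatMap
              (fun P => prefixes.flatMap (fun s => pvExpandS kmer alphabet P start s)) := by
      intro o p _
      rw [pvAltRec_eq kmer alphabet k r (p + 1) _ o]
      congr 1
      rw [List.flatMap_map]
      apply List.flatMap_congr
      intro P _
      rw [List.flatMap_assoc]
      apply List.flatMap_congr
      intro s _
      rw [List.flatMap_map]
      simp only [pvExpandS]
    rw [PySem.List.foldl_congr_mem _ _ _ _ hbody, PySem.List.foldl_append_eq_flatMap]
    congr 1
    have hb : k - ((r : Int) + 1) + 1 = k - (r : Int) := by ring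
    rw [hb]
    exact pvCombLoop k r _ start

-- nested foldl = foldl over the flatMap
lemma pvFoldlFlatMap {α β γ : Type} (l : List α) (f : α → List β) (g : γ → β → γ) (init : γ) :
    l.foldl (fun acc a => (f a).foldl g acc) init = (l.flatMap f).foldl g init := by
  induction l generalizing init with
  | nil => rfl
  | cons x t ih => simp [List.flatMap_cons, List.foldl_append, ih]

-- ===== VERDICT (by name: the statement is the Claim_ definition above) =====
theorem generate_mismatch_neighbors_spec : Claim_equal_generate_mismatch_neighbors := by
  intro kmer alphabet m _ _
  unfold Spec_generate_mismatch_neighbors generate_mismatch_neighbors generate_mismatch_neighbors_alt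
  simp only [PySem.Set.ofList_eq_foldl]
  rw [pvAltRec_eq kmer alphabet _ m.toNat 0 [""] []]
  simp only [List.nil_append, List.foldl_append, List.foldl_cons, List.foldl_nil]
  -- A's nested foldls as a fold of Set.add over the candidate stream
  have hA : ∀ (acc : List String), ∀ positions ∈ PySem.List.combinations (PySem.List.pyRange 0 (PySem.Str.len kmer) 1) m.toNat,
      (pvProd alphabet m.toNat).foldl
          (fun nb2 replacements =>
            PySem.Set.add nb2 (PySem.Str.join ""
              ((positions.zip replacements).foldl
                (fun l pr => PySem.List.pySetD l pr.1 pr.2)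
                (kmer.toList.map (fun c => String.ofList [c]))))) acc
        = ((pvProd alphabet m.toNat).map (fun replacements =>
            PySem.Str.join ""
              ((positions.zip replacements).foldl
                (fun l pr => PySem.List.pySetD l pr.1 pr.2)
                (kmer.toList.map (fun c => String.ofList [c]))))).foldl PySem.Set.add acc := by
    intro acc positions _
    rw [List.foldl_map]
  rw [PySem.List.foldl_congr_mem _ _ _ _ hA]
  have hEmpty : (PySem.Set.empty : PySem.Set String) = [] := rfl
  rw [hEmpty, pvFoldlFlatMap]
  -- it remains to show the two candidate streams are the same list
  suffices hstream :
      (PySem.List.combinations (PySem.List.pyRange 0 (PySem.Str.len kmer) 1) m.toNat).flatMap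
          (fun positions => (pvProd alphabet m.toNat).map (fun replacements =>
            PySem.Str.join ""
              ((positions.zip replacements).foldl
                (fun l pr => PySem.List.pySetD l pr.1 pr.2)
                (kmer.toList.map (fun c => String.ofList [c])))))
        = (PySem.List.combinations (PySem.List.pyRange 0 (PySem.Str.len kmer) 1) m.toNat).flatMap
            (fun P => [""].flatMap (fun s => pvExpandS kmer alphabet P 0 s)) by
    rw [hstream]
  have hk : PySem.Str.len kmer = (kmer.toList.length : Int) := by simp [pysem]
  have hrange : PySem.List.pyRange 0 (PySem.Str.len kmer) 1
      = (List.range kmer.toList.length).map (Nat.cast : Nat → Int) := by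
    rw [hk, PySem.List.pyRange_one]
    simp
  rw [hrange, PySem.List.combinations_map, List.flatMap_map, List.flatMap_map]
  apply List.flatMap_congr
  intro Pn hPn
  have hsub := PySem.List.sublist_of_mem_combinations hPn
  have hlenP : Pn.length = m.toNat := PySem.List.length_of_mem_combinations hPn
  have hpw : Pn.Pairwise (· < ·) := List.Pairwise.sublist hsub List.pairwise_lt_range
  have hbd : ∀ p ∈ Pn, p < kmer.toList.length := fun p hp => List.mem_range.mp (hsub.subset hp)
  -- B's batch for this position list
  have hB : [""].flatMap (fun s => pvExpandS kmer alphabet (Pn.map (Nat.cast : Nat → Int)) 0 s)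
      = (pvProd alphabet m.toNat).map (fun reps => "" ++ pvSegsS kmer 0 Pn reps) := by
    simp only [List.flatMap_cons, List.flatMap_nil, List.append_nil]
    rw [show (0 : Int) = ((0 : Nat) : Int) by simp, pvExpandS_prod, hlenP]
  rw [hB]
  apply List.map_congr_left
  intro reps hreps
  exact pvCandidate kmer Pn reps
    (by rw [pvProd_length alphabet m.toNat reps hreps, hlenP]) hpw hbd
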